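-- pv_equiv track=rewrite | github.com/pypi-data/pypi-mirror-385 | packages/wildduckpipe/wildduckpipe-0.1.0-py3-none-any.whl/wdpipe/pre_processing/combination.py | chunk_collection
-- ===== SOURCE A (Python) =====
-- def chunk_collection(collection, chunk_size, overlap=0):
--     """
--     Given a `collection` it will divide it into chunks of `chunk_size` with an
--     option to have an `overlap` between chunks. It will discard the chunks that
--     have an index that is out of bounds.
--
--     Arguments
--     ---------
--         collection: list like object
--             Collection to chunk.
--         chunk_size: int
--             Size of the chunks.
--         overlap: int, default=0
--             Number of element to overlap.
--     Returns
--     -------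
--         chunks: list of lists
--             List containing the chunks.
--     """
--     if overlap >= chunk_size:
--         raise Exception("Block size greater or equal the overlap will generate infinite loop")
--     # Correction due to implicit subtraction on the loop
--     overlap = overlap - 1
--
--     # First element
--     indexes = [list(range(0, chunk_size))]
--
--     b = 0  # Starting b
--     while b < len(collection):
--         # Fist limit: last element of the last list minus overlap
--         a = indexes[-1][-1] - overlap
--         b = a + chunk_size  # Second limit with step size
--         # There is an implicit minus here since range goes up to b-1
--         indexes.append(list(range(a, b)))
--
--     # Filtering
--     indexes = [index for index in indexes if not len(collection) in index]
--
--     chunks = []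
--     for index in indexes:
--         chunks.append([collection[i] for i in index])
--
--     return chunks
-- ===== SOURCE B (Python) =====
-- def chunk_collection(collection, chunk_size, overlap=0):
--     if overlap >= chunk_size:
--         raise Exception("Block size greater or equal the overlap will generate infinite loop")
--     step = chunk_size - overlap
--     n = len(collection)
--     return [[collection[i] for i in range(s, s + chunk_size)]
--             for s in range(0, n - chunk_size + 1, step)]
-- ===== Notes on version B (the rewrite author's own statement) =====
-- stated objective: simpler
-- what changed: Replaces A's overgenerate-then-filter while-loop (growing an index-list table from the last window's last element, then discarding windows that contain len(collection), then a third pass gathering elements) with a single comprehension over the closed-form set of valid chunk starts range(0, n - chunk_size + 1, chunk_size - overlap).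
-- outside the precondition, e.g. on chunk_collection([], -1, -2): A returns [[]], B returns [[], []]
import Mathlib
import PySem

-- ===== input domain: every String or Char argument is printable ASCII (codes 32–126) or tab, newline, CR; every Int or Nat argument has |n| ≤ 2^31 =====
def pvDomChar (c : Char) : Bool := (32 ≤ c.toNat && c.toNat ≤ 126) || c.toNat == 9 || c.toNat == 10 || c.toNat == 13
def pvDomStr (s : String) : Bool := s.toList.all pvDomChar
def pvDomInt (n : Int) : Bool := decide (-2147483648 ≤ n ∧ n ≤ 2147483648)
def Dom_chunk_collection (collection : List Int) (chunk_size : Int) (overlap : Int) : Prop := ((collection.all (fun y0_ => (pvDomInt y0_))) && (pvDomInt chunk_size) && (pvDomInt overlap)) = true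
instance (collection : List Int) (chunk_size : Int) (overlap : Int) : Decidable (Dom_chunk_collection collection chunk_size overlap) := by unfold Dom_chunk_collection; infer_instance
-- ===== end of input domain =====

-- B replaces A's overgenerate-then-filter while-loop over index lists by one pass over the
-- closed-form valid chunk starts range(0, n - chunk_size + 1, chunk_size - overlap); same values on Pre_.


-- ===== PORT A =====
-- the while-loop: state = (indexes, b); `.getD` defaults are only reached where the Python
-- raises IndexError on indexes[-1][-1] (empty last window), which Pre_ excludes
def chunkLoopA (n cs ov1 : Int) : Nat → List (List Int) → Int → List (List Int)
  | 0, indexes, _ => indexes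
  | fuel+1, indexes, b =>
    if b < n then
      let a := (PySem.List.pyGet? ((PySem.List.pyGet? indexes (-1)).getD []) (-1)).getD 0 - ov1
      chunkLoopA n cs ov1 fuel (indexes ++ [PySem.List.pyRange a (a + cs) 1]) (a + cs)
    else indexes

-- A raises Exception when overlap ≥ chunk_size (excluded by Pre_); fuel length+1 suffices since b
-- grows by ≥ 1 per iteration under Pre_; collection[i] is pyGet? (default never reached under Pre_)
def chunk_collection (collection : List Int) (chunk_size : Int) (overlap : Int) : List (List Int) :=
  ((chunkLoopA (collection.length : Int) chunk_size (overlap - 1) (collection.length + 1)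
      [PySem.List.pyRange 0 chunk_size 1] 0).filter
    (fun idx => !(idx.contains ((collection.length : Int))))).map
    (fun idx => idx.map (fun i => (PySem.List.pyGet? collection i).getD 0))

-- ===== PORT B =====
def chunk_collection_alt (collection : List Int) (chunk_size : Int) (overlap : Int) : List (List Int) :=
  (PySem.List.pyRange 0 ((collection.length : Int) - chunk_size + 1) (chunk_size - overlap)).map
    (fun s => (PySem.List.pyRange s (s + chunk_size) 1).map
      (fun i => (PySem.List.pyGet? collection i).getD 0))

-- ===== PRECONDITION & SPEC =====
-- Pre_ excludes overlap ≥ chunk_size (A raises Exception), non-positive chunk_size (A raises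
-- IndexError on any nonempty collection; on the empty collection A's [[]] of one phantom chunk is an
-- artefact of its seed window), and strides whose last generated window starts past the end of a
-- nonempty collection (A keeps that out-of-bounds window and raises IndexError); the third conjunct
-- says exactly that the last generated window start, max(1, ceil((n-cs)/step))*step, is ≤ n.
def Pre_chunk_collection (collection : List Int) (chunk_size : Int) (overlap : Int) : Prop :=
  1 ≤ chunk_size ∧ overlap < chunk_size ∧
    (0 < (collection.length : Int) →
      max 1 (PySem.Int.floordiv ((collection.length : Int) - chunk_size + (chunk_size - overlap) - 1)
          (chunk_size - overlap)) * (chunk_size - overlap) ≤ (collection.length : Int))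
instance (collection : List Int) (chunk_size : Int) (overlap : Int) : Decidable (Pre_chunk_collection collection chunk_size overlap) := by unfold Pre_chunk_collection; infer_instance
def pvWitness_chunk_collection : List Int × Int × Int := ([1, 2, 3], 2, 1)

def Spec_chunk_collection (collection : List Int) (chunk_size : Int) (overlap : Int) (out : List (List Int)) : Prop := out = chunk_collection_alt collection chunk_size overlap
instance (collection : List Int) (chunk_size : Int) (overlap : Int) (out : List (List Int)) : Decidable (Spec_chunk_collection collection chunk_size overlap out) := by unfold Spec_chunk_collection; infer_instance

-- ===== CLAIM (what is proved, stated in full; the proofs are below) =====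
def Claim_equal_chunk_collection : Prop := ∀ (collection : List Int) (chunk_size : Int) (overlap : Int), Dom_chunk_collection collection chunk_size overlap → Pre_chunk_collection collection chunk_size overlap → Spec_chunk_collection collection chunk_size overlap (chunk_collection collection chunk_size overlap)

-- ===== LEMMAS AND PROOFS =====

-- pyRange with a positive step: nil / cons unfolding (not in the PySem book)
lemma pvRange_nil_of_pos {a b st : Int} (hst : 0 < st) (h : b ≤ a) :
    PySem.List.pyRange a b st = [] := by
  rw [PySem.List.pyRange_of_pos a b hst, if_neg (by omega)]
  simp

lemma pvRange_cons_of_pos {a b st : Int} (hst : 0 < st) (h : a < b) :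
    PySem.List.pyRange a b st = a :: PySem.List.pyRange (a + st) b st := by
  rw [PySem.List.pyRange_of_pos a b hst, PySem.List.pyRange_of_pos (a + st) b hst, if_pos h]
  have hnum : b - a + st - 1 = (b - a - 1) + 1 * st := by ring
  have hq : (b - a + st - 1) / st = (b - a - 1) / st + 1 := by
    rw [hnum, Int.add_mul_ediv_right _ _ (by omega)]
  have hq0 : 0 ≤ (b - a - 1) / st := Int.ediv_nonneg (by omega) (by omega)
  have hN : ((b - a + st - 1) / st).toNat = ((b - a - 1) / st).toNat + 1 := by omega
  rw [hN, List.range_succ_eq_map, List.map_cons, List.map_map]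
  have hM : (if a + st < b then ((b - (a + st) + st - 1) / st).toNat else 0)
      = ((b - a - 1) / st).toNat := by
    by_cases h2 : a + st < b
    · rw [if_pos h2]; congr 2; ring_nf
    · rw [if_neg h2]
      have : (b - a - 1) / st = 0 := Int.ediv_eq_zero_of_lt (by omega) (by omega)
      omega
  rw [hM]
  congr 1
  · norm_num
  · apply List.map_congr_left
    intro k _
    simp only [Function.comp_apply]
    push_cast
    ring

-- last element of a nonempty window
lemma pvLastWin {s cs : Int} (hcs : 1 ≤ cs) :
    PySem.List.pyGet? (PySem.List.pyRange s (s + cs) 1) (-1) = some (s + cs - 1) := by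
  have h : s + cs = (s + cs - 1) + 1 := by ring
  rw [h, PySem.List.pyRange_one_succ_right (by omega),
    PySem.List.pyGet?_neg_one_append_singleton]
  norm_num

-- canonical shape of A's loop: the chain of windows s, s+st, … while b < n
def pvT (n cs st : Int) : Nat → Int → Int → List (List Int)
  | 0, s, _ => [PySem.List.pyRange s (s + cs) 1]
  | f+1, s, b =>
    if b < n then PySem.List.pyRange s (s + cs) 1 :: pvT n cs st f (s + st) (s + st + cs)
    else [PySem.List.pyRange s (s + cs) 1]

lemma pvLoop_eq_pvT (n cs ov1 : Int) (hcs : 1 ≤ cs) :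
    ∀ (f : Nat) (I : List (List Int)) (s b : Int),
    chunkLoopA n cs ov1 f (I ++ [PySem.List.pyRange s (s + cs) 1]) b
      = I ++ pvT n cs (cs - 1 - ov1) f s b := by
  intro f
  induction f with
  | zero => intro I s b; rfl
  | succ f ih =>
    intro I s b
    rw [chunkLoopA, pvT]
    by_cases hb : b < n
    · rw [if_pos hb, if_pos hb]
      rw [PySem.List.pyGet?_neg_one_append_singleton, Option.getD_some, pvLastWin hcs,
        Option.getD_some]
      show chunkLoopA n cs ov1 f
          (I ++ [PySem.List.pyRange s (s + cs) 1] ++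
            [PySem.List.pyRange (s + cs - 1 - ov1) (s + cs - 1 - ov1 + cs) 1])
          (s + cs - 1 - ov1 + cs) = _
      have ha : s + cs - 1 - ov1 = s + (cs - 1 - ov1) := by ring
      rw [ha]
      rw [ih (I ++ [PySem.List.pyRange s (s + cs) 1]) (s + (cs - 1 - ov1)) (s + (cs - 1 - ov1) + cs)]
      simp
    · rw [if_neg hb, if_neg hb]

-- the invariant Pre_'s third conjunct provides along the chain: whenever the loop stops, the
-- current window start is ≤ n
def pvOK (n cs st : Int) : Nat → Int → Int → Prop
  | 0, s, b => n ≤ b → s ≤ n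
  | f+1, s, b => (n ≤ b → s ≤ n) ∧ (b < n → pvOK n cs st f (s + st) (s + st + cs))

lemma pvStop_le (n cs st : Int) (hst : 1 ≤ st)
    (hpre : max 1 (PySem.Int.floordiv (n - cs + st - 1) st) * st ≤ n)
    (k : Int) (hk : 1 ≤ k) (hmin : k = 1 ∨ (k - 1) * st + cs < n) :
    k * st ≤ n := by
  have hkL : k ≤ max 1 (PySem.Int.floordiv (n - cs + st - 1) st) := by
    rcases hmin with h1 | h2
    · subst h1; exact le_max_left _ _
    · refine le_trans ?_ (le_max_right _ _)
      rw [PySem.Int.le_floordiv_iff_mul_le (by omega)]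
      have he : (k - 1) * st = k * st - st := by ring
      linarith
  calc k * st ≤ max 1 (PySem.Int.floordiv (n - cs + st - 1) st) * st :=
        mul_le_mul_of_nonneg_right hkL (by omega)
    _ ≤ n := hpre

lemma pvChainOK (n cs st : Int) (hst : 1 ≤ st)
    (hpre : max 1 (PySem.Int.floordiv (n - cs + st - 1) st) * st ≤ n) :
    ∀ (f : Nat) (k : Int), 1 ≤ k → (k = 1 ∨ (k - 1) * st + cs < n) →
      pvOK n cs st f (k * st) (k * st + cs) := by
  intro f
  induction f with
  | zero => intro k hk hmin _; exact pvStop_le n cs st hst hpre k hk hmin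
  | succ f ih =>
    intro k hk hmin
    refine ⟨fun _ => pvStop_le n cs st hst hpre k hk hmin, fun hblt => ?_⟩
    have h := ih (k + 1) (by omega) (Or.inr (by have : (k + 1 - 1) * st + cs = k * st + cs := by ring
                                                rw [this]; exact hblt))
    have e1 : (k + 1) * st = k * st + st := by ring
    rw [e1] at h
    exact h

lemma pvRootOK (n cs st : Int) (hn : 0 ≤ n) (hst : 1 ≤ st)
    (hpre : 0 < n → max 1 (PySem.Int.floordiv (n - cs + st - 1) st) * st ≤ n) :
    ∀ f : Nat, pvOK n cs st f 0 0 := by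
  intro f
  cases f with
  | zero => exact fun _ => hn
  | succ f =>
    refine ⟨fun _ => hn, fun h0n => ?_⟩
    have h := pvChainOK n cs st hst (hpre h0n) f 1 le_rfl (Or.inl rfl)
    have e1 : (1 : Int) * st = 0 + st := by ring
    rw [e1] at h
    exact h

-- what the filter does to a single window at a stop state
lemma pvStopCase (n cs st s b : Int) (_hn : 0 ≤ n) (hcs : 1 ≤ cs) (hst : 1 ≤ st)
    (hb : b = s + cs ∨ (s = 0 ∧ b = 0)) (hnb : n ≤ b) (hs : s ≤ n) :
    List.filter (fun w => !(w.contains n)) [PySem.List.pyRange s (s + cs) 1]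
      = (PySem.List.pyRange s (n - cs + 1) st).map
          (fun t => PySem.List.pyRange t (t + cs) 1) := by
  by_cases hlt : n < s + cs
  · have hmem : n ∈ PySem.List.pyRange s (s + cs) 1 := PySem.List.mem_pyRange_one.mpr ⟨hs, hlt⟩
    have hnil : PySem.List.pyRange s (n - cs + 1) st = [] :=
      pvRange_nil_of_pos (a := s) (b := n - cs + 1) (by omega) (by omega)
    rw [hnil]
    simp [hmem]
  · rw [not_lt] at hlt
    have hbe : b = s + cs := by
      rcases hb with h | ⟨h1, h2⟩
      · exact h
      · omega
    have hnc : ¬ n ∈ PySem.List.pyRange s (s + cs) 1 := by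
      rw [PySem.List.mem_pyRange_one]; omega
    have hcons : PySem.List.pyRange s (n - cs + 1) st
        = s :: PySem.List.pyRange (s + st) (n - cs + 1) st :=
      pvRange_cons_of_pos (a := s) (b := n - cs + 1) (by omega) (by omega)
    have hnil : PySem.List.pyRange (s + st) (n - cs + 1) st = [] :=
      pvRange_nil_of_pos (a := s + st) (b := n - cs + 1) (by omega) (by omega)
    rw [hcons, hnil]
    simp [hnc]

-- main invariant: filtering A's generated chain gives exactly B's start list, mapped to windows
lemma pvT_filter (n cs st : Int) (hn : 0 ≤ n) (hcs : 1 ≤ cs) (hst : 1 ≤ st) :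
    ∀ (f : Nat) (s b : Int), (b = s + cs ∨ (s = 0 ∧ b = 0)) → pvOK n cs st f s b →
      n ≤ b + st * f →
    (pvT n cs st f s b).filter (fun w => !(w.contains n))
      = (PySem.List.pyRange s (n - cs + 1) st).map
          (fun t => PySem.List.pyRange t (t + cs) 1) := by
  intro f
  induction f with
  | zero =>
    intro s b hb hok hfuel
    exact pvStopCase n cs st s b hn hcs hst hb (by simpa using hfuel) (hok (by simpa using hfuel))
  | succ f ih =>
    intro s b hb hok hfuel
    have hok1 : n ≤ b → s ≤ n := hok.1
    have hok2 : b < n → pvOK n cs st f (s + st) (s + st + cs) := hok.2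
    by_cases hblt : b < n
    · rw [pvT, if_pos hblt]
      have hfc : st * ((f : Int) + 1) = st * f + st := by ring
      have hfuel' : n ≤ (s + st + cs) + st * (f : Int) := by
        rcases hb with hbe | ⟨hs0, hb0⟩
        · push_cast at hfuel; linarith
        · subst hs0; subst hb0; push_cast at hfuel; linarith
      have ht := ih (s + st) (s + st + cs) (Or.inl rfl) (hok2 hblt) (by exact_mod_cast hfuel')
      rcases hb with hbe | ⟨hs0, hb0⟩
      · -- b = s + cs < n : window kept, B's start list begins with s
        have hnc : ¬ n ∈ PySem.List.pyRange s (s + cs) 1 := by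
          rw [PySem.List.mem_pyRange_one]; omega
        have hcons : PySem.List.pyRange s (n - cs + 1) st
            = s :: PySem.List.pyRange (s + st) (n - cs + 1) st :=
          pvRange_cons_of_pos (a := s) (b := n - cs + 1) (by omega) (by omega)
        rw [hcons, List.map_cons, ← ht]
        simp [hnc]
      · subst hs0; subst hb0
        by_cases hncs : n < cs
        · -- the window [0, cs) contains n : dropped, and B's start list is empty
          have hmem : n ∈ PySem.List.pyRange 0 (0 + cs) 1 :=
            PySem.List.mem_pyRange_one.mpr ⟨hn, by omega⟩
          have hnil1 : PySem.List.pyRange 0 (n - cs + 1) st = [] :=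
            pvRange_nil_of_pos (a := 0) (b := n - cs + 1) (by omega) (by omega)
          have hnil2 : PySem.List.pyRange (0 + st) (n - cs + 1) st = [] :=
            pvRange_nil_of_pos (a := 0 + st) (b := n - cs + 1) (by omega) (by omega)
          have hc : (PySem.List.pyRange 0 (0 + cs) 1).contains n = true := by simpa using hmem
          rw [List.filter_cons, hc, hnil1, ht, hnil2]
          simp
        · -- cs ≤ n : window kept, B's start list begins with 0
          rw [not_lt] at hncs
          have hnc : ¬ n ∈ PySem.List.pyRange 0 (0 + cs) 1 := by
            rw [PySem.List.mem_pyRange_one]; omega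
          have hcons : PySem.List.pyRange 0 (n - cs + 1) st
              = 0 :: PySem.List.pyRange (0 + st) (n - cs + 1) st :=
            pvRange_cons_of_pos (a := 0) (b := n - cs + 1) (by omega) (by omega)
          have hc : (PySem.List.pyRange 0 (0 + cs) 1).contains n = false := by simpa using hnc
          rw [List.filter_cons, hc, hcons, List.map_cons, ← ht]
          simp
    · rw [pvT, if_neg hblt]
      exact pvStopCase n cs st s b hn hcs hst hb (by omega) (hok1 (by omega))

-- ===== VERDICT (by name: the statement is the Claim_ definition above) =====
theorem chunk_collection_spec : Claim_equal_chunk_collection := by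
  intro collection cs ov _ hpre
  obtain ⟨hcs, hov, hpre3⟩ := hpre
  unfold Spec_chunk_collection chunk_collection chunk_collection_alt
  have hst : 1 ≤ cs - ov := by omega
  have hn : (0 : Int) ≤ (collection.length : Int) := by positivity
  have e0 : PySem.List.pyRange 0 cs 1 = PySem.List.pyRange 0 (0 + cs) 1 := by norm_num
  rw [e0, show [PySem.List.pyRange 0 (0 + cs) 1] = [] ++ [PySem.List.pyRange 0 (0 + cs) 1] from rfl,
    pvLoop_eq_pvT (collection.length : Int) cs (ov - 1) hcs, List.nil_append,
    show cs - 1 - (ov - 1) = cs - ov from by ring]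
  have hfuel : (collection.length : Int) ≤ 0 + (cs - ov) * ((collection.length + 1 : Nat) : Int) := by
    have h1 : (1 : Int) * ((collection.length : Int) + 1) ≤ (cs - ov) * ((collection.length : Int) + 1) :=
      mul_le_mul_of_nonneg_right hst (by omega)
    push_cast
    linarith
  rw [pvT_filter (collection.length : Int) cs (cs - ov) hn hcs hst (collection.length + 1) 0 0
    (Or.inr ⟨rfl, rfl⟩) (pvRootOK (collection.length : Int) cs (cs - ov) hn hst hpre3 _) hfuel]
  rw [List.map_map]
  rfl
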